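-- pv_equiv track=rewrite | github.com/batamorphism/Coding | Python/AtCoder/old/ABC181-E.py | get_w_list
-- ===== SOURCE A (Python) =====
-- def get_w_list(W: list, low: int, high: int) -> list:
--     """
--     ソートされたリストwの部分列で要素がlow以上high以下のものを求める
--     2分探索を用いる
--     Args:
--         W (list): [description]
--         low (int): [description]
--         high (int): [description]
--
--     Returns:
--         list: [description]
--     """
--     length = len(W)
--     # get lowest i
--     # ok = length-1
--     ok = length
--     ng = -1  # ngは配列の外にあるように
--     while ok-ng >= 2:
--         mid = (ok+ng)//2
--         if W[mid] >= low:
--             ok = mid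
--         else:
--             ng = mid
--     low_index = ok
--
--     # get highest i
--     #ok = 0
--     ok = -1
--     ng = length  # ngは配列の外にあるように
--     while ng-ok >= 2:
--         mid = (ok+ng)//2
--         if W[mid] <= high:
--             ok = mid
--         else:
--             ng = mid
--     high_index = ok
--     # いまいちっぽい点(7)
--     # lowやhighがWの範囲外の時にどうすればよいのかわからない
--     # 面倒なので、後でabsをとることを踏まえ[-INF, INF]にしたが、本当は空のリストを返したほうがよさそう
--     if 0 <= low_index <= high_index <= length-1:
--         return [W[low_index], W[high_index]]
--     else:
--         return [-10**23, 10**23]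
-- ===== SOURCE B (Python) =====
-- def get_w_list(W: list, low: int, high: int) -> list:
--     filtered = [w for w in W if low <= w <= high]
--     if filtered:
--         return [filtered[0], filtered[-1]]
--     return [-10**23, 10**23]
-- ===== Notes on version B (the rewrite author's own statement) =====
-- stated objective: simpler
-- what changed: Replaced the two hand-written binary-search loops with a single linear filter pass that returns the first and last element of W inside [low, high] (same sentinel when none exists); Pre_ excludes unsorted lists that have an element inside [low, high], on which A's docstring ('sorted list') specifies no behaviour, so neither value is the specified one.
-- outside the precondition, e.g. on get_w_list([1, 0], 1, 1): A returns [1, 0], B returns [1, 1]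
import Mathlib
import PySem

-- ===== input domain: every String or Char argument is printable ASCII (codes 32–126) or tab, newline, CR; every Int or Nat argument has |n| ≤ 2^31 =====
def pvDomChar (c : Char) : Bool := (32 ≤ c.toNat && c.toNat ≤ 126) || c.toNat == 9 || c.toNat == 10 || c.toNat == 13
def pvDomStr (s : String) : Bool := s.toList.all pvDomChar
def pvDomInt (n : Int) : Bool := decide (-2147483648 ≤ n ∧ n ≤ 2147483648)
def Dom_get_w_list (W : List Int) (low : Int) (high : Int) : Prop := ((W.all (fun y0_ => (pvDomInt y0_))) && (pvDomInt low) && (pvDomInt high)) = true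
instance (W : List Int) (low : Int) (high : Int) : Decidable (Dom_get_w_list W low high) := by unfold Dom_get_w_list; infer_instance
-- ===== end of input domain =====

-- B replaces A's two binary-search loops with one linear filter pass (simpler, not faster);
-- proved equal on nondecreasing W, A's documented precondition.


-- ===== PORT A =====
-- A's first while-loop: shrink (ng, ok] until ok - ng < 2 keeping W[ok..] ≥ low
def pvBsLow (W : List Int) (low : Int) (ok ng : Int) : Int :=
  if _h : ok - ng ≥ 2 then
    let mid := PySem.Int.floordiv (ok + ng) 2
    if low ≤ (PySem.List.pyGet? W mid).getD 0 then pvBsLow W low mid ng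
    else pvBsLow W low ok mid
  else ok
termination_by (ok - ng).toNat
decreasing_by
  all_goals
    simp only [mid, PySem.Int.floordiv_eq_ediv_of_pos (by norm_num : (0:Int) < 2)] at *
    omega

-- A's second while-loop: shrink [ok, ng) until ng - ok < 2 keeping W[..ok] ≤ high
def pvBsHigh (W : List Int) (high : Int) (ok ng : Int) : Int :=
  if _h : ng - ok ≥ 2 then
    let mid := PySem.Int.floordiv (ok + ng) 2
    if (PySem.List.pyGet? W mid).getD 0 ≤ high then pvBsHigh W high mid ng
    else pvBsHigh W high ok mid
  else ok
termination_by (ng - ok).toNat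
decreasing_by
  all_goals
    simp only [mid, PySem.Int.floordiv_eq_ediv_of_pos (by norm_num : (0:Int) < 2)] at *
    omega

def get_w_list (W : List Int) (low : Int) (high : Int) : List Int :=
  let length : Int := PySem.List.len W
  let low_index := pvBsLow W low length (-1)
  let high_index := pvBsHigh W high (-1) length
  if 0 ≤ low_index ∧ low_index ≤ high_index ∧ high_index ≤ length - 1 then
    [(PySem.List.pyGet? W low_index).getD 0, (PySem.List.pyGet? W high_index).getD 0]
  else [-(10^23), 10^23]

-- ===== PORT B =====
def get_w_list_alt (W : List Int) (low : Int) (high : Int) : List Int :=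
  match W.filter (fun w => decide (low ≤ w ∧ w ≤ high)) with
  | [] => [-(10^23), 10^23]
  | x :: xs => [x, (x :: xs).getLast (List.cons_ne_nil x xs)]

-- ===== PRECONDITION & SPEC =====
-- Pre_ excludes unsorted lists that have an element inside [low, high]: unsorted input violates
-- A's documented precondition ("ソートされたリスト" = sorted list — A is a binary search), so no
-- particular return value is specified there.  (Unsorted lists with NO element in [low, high]
-- stay inside Pre_: there both programs provably return the sentinel.)
def Pre_get_w_list (W : List Int) (low : Int) (high : Int) : Prop :=
  W.Pairwise (· ≤ ·) ∨ ∀ w ∈ W, w < low ∨ high < w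
instance (W : List Int) (low : Int) (high : Int) : Decidable (Pre_get_w_list W low high) := by unfold Pre_get_w_list; infer_instance
def pvWitness_get_w_list : List Int × Int × Int := ([1, 2, 2, 5], 2, 4)

def Spec_get_w_list (W : List Int) (low : Int) (high : Int) (out : List Int) : Prop := out = get_w_list_alt W low high
instance (W : List Int) (low : Int) (high : Int) (out : List Int) : Decidable (Spec_get_w_list W low high out) := by unfold Spec_get_w_list; infer_instance

-- ===== CLAIM (what is proved, stated in full; the proofs are below) =====
def Claim_equal_get_w_list : Prop := ∀ (W : List Int) (low : Int) (high : Int), Dom_get_w_list W low high → Pre_get_w_list W low high → Spec_get_w_list W low high (get_w_list W low high)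

-- ===== LEMMAS AND PROOFS =====

-- pvBsLow on a sorted W: starting from a bracket (ng, ok] whose outside is already classified,
-- it returns the least index whose element is ≥ low (length if none).
theorem pvBsLow_spec (W : List Int) (low : Int) (ok ng : Int)
    (hs : ∀ (i j : ℕ) (hi : i < W.length) (hj : j < W.length), i ≤ j → W[i] ≤ W[j])
    (hng : -1 ≤ ng) (hok : ok ≤ (W.length : Int)) (hlt : ng < ok)
    (hlo : ∀ (j : ℕ) (hj : j < W.length), (j : Int) ≤ ng → W[j] < low)
    (hhi : ∀ (j : ℕ) (hj : j < W.length), ok ≤ (j : Int) → low ≤ W[j]) :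
    ng < pvBsLow W low ok ng ∧ pvBsLow W low ok ng ≤ (W.length : Int) ∧
    (∀ (j : ℕ) (hj : j < W.length), (j : Int) < pvBsLow W low ok ng → W[j] < low) ∧
    (∀ (j : ℕ) (hj : j < W.length), pvBsLow W low ok ng ≤ (j : Int) → low ≤ W[j]) := by
  revert hng hok hlt hlo hhi
  fun_induction pvBsLow W low ok ng with
  | case1 ok ng h mid hcmp ih =>
    intro hng hok hlt hlo hhi
    have hmid : mid = (ok + ng) / 2 := PySem.Int.floordiv_eq_ediv_of_pos (by norm_num)
    have hmr : 0 ≤ mid ∧ ng < mid ∧ mid < ok := by rw [hmid]; omega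
    have hmn : mid.toNat < W.length := by omega
    have hv : (PySem.List.pyGet? W mid).getD 0 = W[mid.toNat] := by
      rw [PySem.List.pyGet?_eq_some_getElem W hmr.1 (by omega)]; rfl
    rw [hv] at hcmp
    exact ih hng (by omega) (by omega) hlo
      (fun j hj hle => le_trans hcmp (hs mid.toNat j hmn hj (by omega)))
  | case2 ok ng h mid hcmp ih =>
    intro hng hok hlt hlo hhi
    have hmid : mid = (ok + ng) / 2 := PySem.Int.floordiv_eq_ediv_of_pos (by norm_num)
    have hmr : 0 ≤ mid ∧ ng < mid ∧ mid < ok := by rw [hmid]; omega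
    have hmn : mid.toNat < W.length := by omega
    have hv : (PySem.List.pyGet? W mid).getD 0 = W[mid.toNat] := by
      rw [PySem.List.pyGet?_eq_some_getElem W hmr.1 (by omega)]; rfl
    rw [hv] at hcmp
    obtain ⟨h1, h2, h3, h4⟩ := ih (by omega) hok (by omega)
      (fun j hj hle => lt_of_le_of_lt (hs j mid.toNat hj hmn (by omega)) (by omega))
      hhi
    exact ⟨by omega, h2, h3, h4⟩
  | case3 ok ng h =>
    intro hng hok hlt hlo hhi
    exact ⟨hlt, hok, fun j hj hjlt => hlo j hj (by omega), hhi⟩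

-- pvBsHigh on a sorted W: returns the greatest index whose element is ≤ high (-1 if none).
theorem pvBsHigh_spec (W : List Int) (high : Int) (ok ng : Int)
    (hs : ∀ (i j : ℕ) (hi : i < W.length) (hj : j < W.length), i ≤ j → W[i] ≤ W[j])
    (hok : -1 ≤ ok) (hng : ng ≤ (W.length : Int)) (hlt : ok < ng)
    (hle : ∀ (j : ℕ) (hj : j < W.length), (j : Int) ≤ ok → W[j] ≤ high)
    (hgt : ∀ (j : ℕ) (hj : j < W.length), ng ≤ (j : Int) → high < W[j]) :
    -1 ≤ pvBsHigh W high ok ng ∧ pvBsHigh W high ok ng < (W.length : Int) ∧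
    (∀ (j : ℕ) (hj : j < W.length), (j : Int) ≤ pvBsHigh W high ok ng → W[j] ≤ high) ∧
    (∀ (j : ℕ) (hj : j < W.length), pvBsHigh W high ok ng < (j : Int) → high < W[j]) := by
  revert hok hng hlt hle hgt
  fun_induction pvBsHigh W high ok ng with
  | case1 ok ng h mid hcmp ih =>
    intro hok hng hlt hle hgt
    have hmid : mid = (ok + ng) / 2 := PySem.Int.floordiv_eq_ediv_of_pos (by norm_num)
    have hmr : 0 ≤ mid ∧ ok < mid ∧ mid < ng := by rw [hmid]; omega
    have hmn : mid.toNat < W.length := by omega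
    have hv : (PySem.List.pyGet? W mid).getD 0 = W[mid.toNat] := by
      rw [PySem.List.pyGet?_eq_some_getElem W hmr.1 (by omega)]; rfl
    rw [hv] at hcmp
    exact ih (by omega) hng (by omega)
      (fun j hj hje => le_trans (hs j mid.toNat hj hmn (by omega)) hcmp)
      hgt
  | case2 ok ng h mid hcmp ih =>
    intro hok hng hlt hle hgt
    have hmid : mid = (ok + ng) / 2 := PySem.Int.floordiv_eq_ediv_of_pos (by norm_num)
    have hmr : 0 ≤ mid ∧ ok < mid ∧ mid < ng := by rw [hmid]; omega
    have hmn : mid.toNat < W.length := by omega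
    have hv : (PySem.List.pyGet? W mid).getD 0 = W[mid.toNat] := by
      rw [PySem.List.pyGet?_eq_some_getElem W hmr.1 (by omega)]; rfl
    rw [hv] at hcmp
    exact ih hok (by omega) (by omega) hle
      (fun j hj hje => lt_of_lt_of_le (by omega) (hs mid.toNat j hmn hj (by omega)))
  | case3 ok ng h =>
    intro hok hng hlt hle hgt
    exact ⟨hok, by omega, hle, fun j hj hjgt => hgt j hj (by omega)⟩

theorem filter_take_nil (W : List Int) (p : Int → Bool) (k : Nat)
    (h : ∀ (i : Nat) (hi : i < W.length), i < k → p W[i] = false) :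
    (W.take k).filter p = [] := by
  rw [List.filter_eq_nil_iff]
  intro a ha
  obtain ⟨i, hi, rfl⟩ := List.mem_iff_getElem.mp ha
  rw [List.getElem_take]
  simp only [List.length_take] at hi
  simp [h i (by omega) (by omega)]

theorem filter_drop_nil (W : List Int) (p : Int → Bool) (k : Nat)
    (h : ∀ (i : Nat) (hi : i < W.length), k ≤ i → p W[i] = false) :
    (W.drop k).filter p = [] := by
  rw [List.filter_eq_nil_iff]
  intro a ha
  obtain ⟨i, hi, rfl⟩ := List.mem_iff_getElem.mp ha
  rw [List.getElem_drop]
  simp only [List.length_drop] at hi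
  simp [h (k + i) (by omega) (by omega)]

theorem pvBsLow_bounds (W : List Int) (low : Int) (ok ng : Int) (h : ng < ok) :
    ng < pvBsLow W low ok ng ∧ pvBsLow W low ok ng ≤ ok := by
  revert h
  fun_induction pvBsLow W low ok ng with
  | case1 ok ng h mid hcmp ih =>
    intro hlt
    have hmid : mid = (ok + ng) / 2 := PySem.Int.floordiv_eq_ediv_of_pos (by norm_num)
    have := ih (by omega)
    omega
  | case2 ok ng h mid hcmp ih =>
    intro hlt
    have hmid : mid = (ok + ng) / 2 := PySem.Int.floordiv_eq_ediv_of_pos (by norm_num)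
    have := ih (by omega)
    omega
  | case3 ok ng h => intro hlt; omega

theorem pvBsHigh_bounds (W : List Int) (high : Int) (ok ng : Int) (h : ok < ng) :
    ok ≤ pvBsHigh W high ok ng ∧ pvBsHigh W high ok ng < ng := by
  revert h
  fun_induction pvBsHigh W high ok ng with
  | case1 ok ng h mid hcmp ih =>
    intro hlt
    have hmid : mid = (ok + ng) / 2 := PySem.Int.floordiv_eq_ediv_of_pos (by norm_num)
    have := ih (by omega)
    omega
  | case2 ok ng h mid hcmp ih =>
    intro hlt
    have hmid : mid = (ok + ng) / 2 := PySem.Int.floordiv_eq_ediv_of_pos (by norm_num)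
    have := ih (by omega)
    omega
  | case3 ok ng h => intro hlt; omega

-- when no element of W lies in [low, high], the two searches explore the same midpoints
-- (started from mirrored brackets) and the high index stays below the low index
theorem pvLockstep (W : List Int) (low high : Int)
    (hout : ∀ w ∈ W, w < low ∨ high < w) :
    ∀ (g : Nat) (ok ng : Int), (ok - ng).toNat = g → -1 ≤ ng → ng < ok →
      ok ≤ (W.length : Int) →
      pvBsHigh W high ng ok < pvBsLow W low ok ng := by
  intro g
  induction g using Nat.strong_induction_on with
  | _ g ih =>
    intro ok ng hg hng hlt hok
    by_cases h2 : ok - ng ≥ 2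
    · have hmid : PySem.Int.floordiv (ok + ng) 2 = (ok + ng) / 2 :=
        PySem.Int.floordiv_eq_ediv_of_pos (by norm_num)
      have hmid2 : PySem.Int.floordiv (ng + ok) 2 = (ok + ng) / 2 := by
        rw [add_comm]; exact hmid
      have hmr : 0 ≤ (ok + ng) / 2 ∧ ng < (ok + ng) / 2 ∧ (ok + ng) / 2 < ok := by omega
      have hmn : ((ok + ng) / 2).toNat < W.length := by omega
      have hv : (PySem.List.pyGet? W ((ok + ng) / 2)).getD 0 = W[((ok + ng) / 2).toNat] := by
        rw [PySem.List.pyGet?_eq_some_getElem W (by omega) (by omega)]; rfl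
      have hstepL : pvBsLow W low ok ng =
          if low ≤ W[((ok + ng) / 2).toNat] then pvBsLow W low ((ok + ng) / 2) ng
          else pvBsLow W low ok ((ok + ng) / 2) := by
        conv_lhs => unfold pvBsLow
        rw [dif_pos h2]
        simp only [hmid, hv]
      have hstepH : pvBsHigh W high ng ok =
          if W[((ok + ng) / 2).toNat] ≤ high then pvBsHigh W high ((ok + ng) / 2) ok
          else pvBsHigh W high ng ((ok + ng) / 2) := by
        conv_lhs => unfold pvBsHigh
        rw [dif_pos (by omega : ok - ng ≥ 2)]
        simp only [hmid2, hv]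
      rcases hout W[((ok + ng) / 2).toNat] (List.getElem_mem hmn) with hlo | hhi
      · -- W[mid] < low
        rw [hstepL, if_neg (by omega)]
        by_cases hc2 : W[((ok + ng) / 2).toNat] ≤ high
        · rw [hstepH, if_pos hc2]
          exact ih (ok - (ok + ng) / 2).toNat (by omega) ok ((ok + ng) / 2) rfl (by omega)
            (by omega) hok
        · rw [hstepH, if_neg hc2]
          have hb1 := pvBsLow_bounds W low ok ((ok + ng) / 2) (by omega)
          have hb2 := pvBsHigh_bounds W high ng ((ok + ng) / 2) (by omega)
          omega
      · -- high < W[mid]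
        rw [hstepH, if_neg (by omega)]
        by_cases hc1 : low ≤ W[((ok + ng) / 2).toNat]
        · rw [hstepL, if_pos hc1]
          exact ih ((ok + ng) / 2 - ng).toNat (by omega) ((ok + ng) / 2) ng rfl hng
            (by omega) (by omega)
        · rw [hstepL, if_neg hc1]
          have hb1 := pvBsLow_bounds W low ok ((ok + ng) / 2) (by omega)
          have hb2 := pvBsHigh_bounds W high ng ((ok + ng) / 2) (by omega)
          omega
    · have hL : pvBsLow W low ok ng = ok := by
        conv_lhs => unfold pvBsLow
        rw [dif_neg h2]
      have hH : pvBsHigh W high ng ok = ng := by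
        conv_lhs => unfold pvBsHigh
        rw [dif_neg (by omega : ¬ ok - ng ≥ 2)]
      omega

theorem get_w_list_eq_alt_out (W : List Int) (low : Int) (high : Int)
    (hall : ∀ w ∈ W, w < low ∨ high < w) :
    get_w_list W low high = get_w_list_alt W low high := by
  have hlock : pvBsHigh W high (-1) (W.length : Int) < pvBsLow W low (W.length : Int) (-1) :=
    pvLockstep W low high hall ((W.length : Int) - (-1)).toNat (W.length : Int) (-1)
      rfl (by omega) (by omega) (le_refl _)
  have hempty : W.filter (fun w => decide (low ≤ w ∧ w ≤ high)) = [] := by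
    rw [List.filter_eq_nil_iff]
    intro a ha
    rcases hall a ha with h1 | h1 <;> simp <;> omega
  simp only [get_w_list, get_w_list_alt, PySem.List.len_eq, hempty]
  rw [if_neg (by omega)]

theorem get_w_list_eq_alt_sorted (W : List Int) (low : Int) (high : Int)
    (hpre : W.Pairwise (· ≤ ·)) :
    get_w_list W low high = get_w_list_alt W low high := by
  have hs : ∀ (i j : ℕ) (hi : i < W.length) (hj : j < W.length), i ≤ j → W[i] ≤ W[j] := by
    intro i j hi hj hij
    rcases Nat.lt_or_ge i j with hlt | hge
    · exact (List.pairwise_iff_getElem.mp hpre) i j hi hj hlt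
    · have : i = j := by omega
      subst this; rfl
  obtain ⟨hr0, hrn, hrlt, hrge⟩ := pvBsLow_spec W low (W.length : Int) (-1) hs
    (by omega) (le_refl _) (by omega)
    (fun j hj hle => absurd hle (by omega))
    (fun j hj hge => absurd hge (by omega))
  obtain ⟨hh0, hhn, hhle, hhgt⟩ := pvBsHigh_spec W high (-1) (W.length : Int) hs
    (by omega) (le_refl _) (by omega)
    (fun j hj hle => absurd hle (by omega))
    (fun j hj hge => absurd hge (by omega))
  set r := pvBsLow W low (W.length : Int) (-1) with hrdef
  set h := pvBsHigh W high (-1) (W.length : Int) with hhdef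
  set p : Int → Bool := fun w => decide (low ≤ w ∧ w ≤ high) with hpdef
  simp only [get_w_list, get_w_list_alt, PySem.List.len_eq, ← hrdef, ← hhdef, ← hpdef]
  by_cases hcase : r ≤ h
  · -- at least one element lies in [low, high]; A returns its first and last occurrence
    have hrn' : r.toNat < W.length := by omega
    have hhn' : h.toNat < W.length := by omega
    have hva : (PySem.List.pyGet? W r).getD 0 = W[r.toNat] := by
      rw [PySem.List.pyGet?_eq_some_getElem W (by omega) (by omega)]; rfl
    have hvb : (PySem.List.pyGet? W h).getD 0 = W[h.toNat] := by
      rw [PySem.List.pyGet?_eq_some_getElem W (by omega) (by omega)]; rfl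
    rw [if_pos ⟨by omega, hcase, by omega⟩, hva, hvb]
    have hpr : p W[r.toNat] = true := by
      simp only [hpdef, decide_eq_true_eq]
      exact ⟨hrge r.toNat hrn' (by omega), hhle r.toNat hrn' (by omega)⟩
    have hph : p W[h.toNat] = true := by
      simp only [hpdef, decide_eq_true_eq]
      exact ⟨hrge h.toNat hhn' (by omega), hhle h.toNat hhn' (by omega)⟩
    have hhead : (W.filter p).head? = some W[r.toNat] := by
      conv_lhs => rw [← List.take_append_drop r.toNat W]
      rw [List.filter_append,
        filter_take_nil W p r.toNat (fun i hi hik => by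
          simp only [hpdef, decide_eq_false_iff_not]
          intro hc
          exact absurd hc.1 (by have := hrlt i hi (by omega); omega)),
        List.nil_append,
        List.drop_eq_getElem_cons hrn', List.filter_cons_of_pos hpr]
      rfl
    have hlast : (W.filter p).getLast? = some W[h.toNat] := by
      conv_lhs => rw [← List.take_append_drop (h.toNat + 1) W]
      rw [List.filter_append,
        filter_drop_nil W p (h.toNat + 1) (fun i hi hik => by
          simp only [hpdef, decide_eq_false_iff_not]
          intro hc
          exact absurd hc.2 (by have := hhgt i hi (by omega); omega)),
        List.append_nil,
        List.take_add_one, List.getElem?_eq_getElem hhn']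
      simp only [Option.toList_some, List.filter_append, List.filter_cons_of_pos hph,
        List.filter_nil]
      exact List.getLast?_concat
    cases hf : W.filter p with
    | nil => rw [hf] at hhead; simp at hhead
    | cons x xs =>
      rw [hf] at hhead hlast
      simp only [List.head?_cons, Option.some.injEq] at hhead
      rw [List.getLast?_eq_some_getLast (List.cons_ne_nil x xs)] at hlast
      simp only [Option.some.injEq] at hlast
      rw [← hhead, ← hlast]
  · -- no element in range: both sides return the sentinel
    have hempty : W.filter p = [] := by
      rw [List.filter_eq_nil_iff]
      intro a ha
      obtain ⟨i, hi, rfl⟩ := List.mem_iff_getElem.mp ha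
      simp only [hpdef, decide_eq_true_eq]
      intro hc
      rcases lt_or_ge (i : Int) r with hir | hir
      · exact absurd hc.1 (by have := hrlt i hi hir; omega)
      · exact absurd hc.2 (by have := hhgt i hi (by omega); omega)
    rw [if_neg (by omega), hempty]

-- ===== VERDICT (by name: the statement is the Claim_ definition above) =====
theorem get_w_list_spec : Claim_equal_get_w_list := by
  intro W low high _hdom hpre
  rcases hpre with hsorted | hall
  · exact get_w_list_eq_alt_sorted W low high hsorted
  · exact get_w_list_eq_alt_out W low high hall
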